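-- pv_equiv track=rewrite | github.com/zhangyiyuqirose-eng/pm-digital-employee | app/ai/safety_guard.py | _generate_injection_explanation
-- ===== SOURCE A (Python) =====
-- from typing import Any, Dict, List, Optional, Set
--
-- def _generate_injection_explanation(
--
--     patterns: List[str],
-- ) -> str:
--     """
--     生成注入检测解释.
--
--     Args:
--         patterns: 检测到的模式
--
--     Returns:
--         str: 解释说明
--     """
--     if not patterns:
--         return ""
--
--     explanations = []
--
--     if any("ignore" in p.lower() for p in patterns):
--         explanations.append("检测到尝试忽略系统指令的行为")
--
--     if any("prompt" in p.lower() or "instruction" in p.lower() for p in patterns):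
--         explanations.append("检测到尝试获取系统提示词的行为")
--
--     if any("bypass" in p.lower() or "override" in p.lower() for p in patterns):
--         explanations.append("检测到尝试绕过安全限制的行为")
--
--     if any("roleplay" in p.lower() or "act as" in p.lower() for p in patterns):
--         explanations.append("检测到角色扮演攻击尝试")
--
--     return "; ".join(explanations) if explanations else "检测到可疑的输入模式"
-- ===== SOURCE B (Python) =====
-- from typing import List
--
--
-- def _generate_injection_explanation(
--     patterns: List[str],
-- ) -> str:
--     if not patterns:
--         return ""
--
--     f0 = f1 = f2 = f3 = False
--     for p in patterns:
--         if f0 and f1 and f2 and f3: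
--             break
--         pl = p.lower()
--         f0 = f0 or "ignore" in pl
--         f1 = f1 or "prompt" in pl or "instruction" in pl
--         f2 = f2 or "bypass" in pl or "override" in pl
--         f3 = f3 or "roleplay" in pl or "act as" in pl
--
--     explanations = []
--     if f0:
--         explanations.append("检测到尝试忽略系统指令的行为")
--     if f1:
--         explanations.append("检测到尝试获取系统提示词的行为")
--     if f2:
--         explanations.append("检测到尝试绕过安全限制的行为")
--     if f3:
--         explanations.append("检测到角色扮演攻击尝试")
--
--     return "; ".join(explanations) if explanations else "检测到可疑的输入模式"
-- ===== Notes on version B (the rewrite author's own statement) =====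
-- stated objective: simpler
-- what changed: Replaces A's four separate any() scans over the pattern list by a single pass that maintains four boolean flags (with an early break once all are set) and then builds the explanation list from the flags.
import Mathlib
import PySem

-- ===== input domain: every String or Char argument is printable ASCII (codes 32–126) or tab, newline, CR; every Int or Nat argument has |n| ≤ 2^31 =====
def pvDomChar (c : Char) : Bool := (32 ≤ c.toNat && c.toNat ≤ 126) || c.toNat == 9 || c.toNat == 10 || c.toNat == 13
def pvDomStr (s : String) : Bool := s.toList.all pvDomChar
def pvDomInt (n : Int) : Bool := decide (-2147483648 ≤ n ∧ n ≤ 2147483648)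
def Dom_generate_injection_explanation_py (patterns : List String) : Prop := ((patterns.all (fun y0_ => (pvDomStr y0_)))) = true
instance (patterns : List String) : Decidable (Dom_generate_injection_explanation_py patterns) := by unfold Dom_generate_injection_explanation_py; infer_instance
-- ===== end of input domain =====

-- B replaces A's four separate any() scans by one pass over the patterns that
-- maintains four boolean flags (with an early break once all are set); same result.

-- ===== PORT A =====
def generate_injection_explanation_py (patterns : List String) : String :=
  if patterns = [] then ""
  else
    let explanations : List String := []
    let explanations := if patterns.any (fun p => PySem.Str.isIn "ignore" (PySem.Str.lower p))
      then explanations ++ ["检测到尝试忽略系统指令的行为"] else explanations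
    let explanations := if patterns.any (fun p => PySem.Str.isIn "prompt" (PySem.Str.lower p) || PySem.Str.isIn "instruction" (PySem.Str.lower p))
      then explanations ++ ["检测到尝试获取系统提示词的行为"] else explanations
    let explanations := if patterns.any (fun p => PySem.Str.isIn "bypass" (PySem.Str.lower p) || PySem.Str.isIn "override" (PySem.Str.lower p))
      then explanations ++ ["检测到尝试绕过安全限制的行为"] else explanations
    let explanations := if patterns.any (fun p => PySem.Str.isIn "roleplay" (PySem.Str.lower p) || PySem.Str.isIn "act as" (PySem.Str.lower p))
      then explanations ++ ["检测到角色扮演攻击尝试"] else explanations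
    if explanations ≠ [] then PySem.Str.join "; " explanations else "检测到可疑的输入模式"

-- ===== PORT B =====
-- the single flag-maintaining loop of Source B (with its early break)
def pvFlagLoop (ps : List String) (f0 f1 f2 f3 : Bool) : Bool × Bool × Bool × Bool :=
  match ps with
  | [] => (f0, f1, f2, f3)
  | p :: rest =>
    if f0 && f1 && f2 && f3 then (f0, f1, f2, f3)
    else
      let pl := PySem.Str.lower p
      pvFlagLoop rest
        (f0 || PySem.Str.isIn "ignore" pl)
        (f1 || PySem.Str.isIn "prompt" pl || PySem.Str.isIn "instruction" pl)
        (f2 || PySem.Str.isIn "bypass" pl || PySem.Str.isIn "override" pl)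
        (f3 || PySem.Str.isIn "roleplay" pl || PySem.Str.isIn "act as" pl)

def generate_injection_explanation_py_alt (patterns : List String) : String :=
  if patterns = [] then ""
  else
    let fs := pvFlagLoop patterns false false false false
    let explanations : List String := []
    let explanations := if fs.1 then explanations ++ ["检测到尝试忽略系统指令的行为"] else explanations
    let explanations := if fs.2.1 then explanations ++ ["检测到尝试获取系统提示词的行为"] else explanations
    let explanations := if fs.2.2.1 then explanations ++ ["检测到尝试绕过安全限制的行为"] else explanations
    let explanations := if fs.2.2.2 then explanations ++ ["检测到角色扮演攻击尝试"] else explanations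
    if explanations ≠ [] then PySem.Str.join "; " explanations else "检测到可疑的输入模式"

-- ===== PRECONDITION & SPEC =====
def Spec_generate_injection_explanation_py (patterns : List String) (out : String) : Prop := out = generate_injection_explanation_py_alt patterns
instance (patterns : List String) (out : String) : Decidable (Spec_generate_injection_explanation_py patterns out) := by unfold Spec_generate_injection_explanation_py; infer_instance

-- ===== CLAIM (what is proved, stated in full; the proofs are below) =====
def Claim_equal_generate_injection_explanation_py : Prop := ∀ (patterns : List String), Dom_generate_injection_explanation_py patterns → Spec_generate_injection_explanation_py patterns (generate_injection_explanation_py patterns)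

-- ===== LEMMAS AND PROOFS =====

-- the flag loop (with its early break) computes exactly the four any-scans
theorem pvFlagLoop_eq (ps : List String) (f0 f1 f2 f3 : Bool) :
    pvFlagLoop ps f0 f1 f2 f3 =
      (f0 || ps.any (fun p => PySem.Str.isIn "ignore" (PySem.Str.lower p)),
       f1 || ps.any (fun p => PySem.Str.isIn "prompt" (PySem.Str.lower p) || PySem.Str.isIn "instruction" (PySem.Str.lower p)),
       f2 || ps.any (fun p => PySem.Str.isIn "bypass" (PySem.Str.lower p) || PySem.Str.isIn "override" (PySem.Str.lower p)),
       f3 || ps.any (fun p => PySem.Str.isIn "roleplay" (PySem.Str.lower p) || PySem.Str.isIn "act as" (PySem.Str.lower p))) := by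
  induction ps generalizing f0 f1 f2 f3 with
  | nil => simp [pvFlagLoop]
  | cons p rest ih =>
    by_cases h : f0 && f1 && f2 && f3
    · obtain ⟨⟨⟨h0, h1⟩, h2⟩, h3⟩ := by simpa [Bool.and_eq_true] using h
      subst h0 h1 h2 h3
      simp [pvFlagLoop]
    · simp only [pvFlagLoop, h, ih]
      simp [Bool.or_assoc]

-- ===== VERDICT (by name: the statement is the Claim_ definition above) =====
theorem generate_injection_explanation_py_spec : Claim_equal_generate_injection_explanation_py := by
  intro patterns _
  unfold Spec_generate_injection_explanation_py
  unfold generate_injection_explanation_py generate_injection_explanation_py_alt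
  by_cases h : patterns = []
  · simp [h]
  · simp only [h, if_false, pvFlagLoop_eq, Bool.false_or]
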